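-- pv_equiv track=rewrite | github.com/nbasic/cubic-polycirculant-nuts | resolver.py | relabel
-- ===== SOURCE A (Python) =====
-- def relabel(pre):
--     '''
--     Relabel the vertices of a pregraph, so that vertices of the
--     returned graph are labelled 0, 1, 2, ...
--     '''
--     rel = []
--     mp = dict()
--     n = 0
--     for u in pre:
--         for x in u:
--             if x not in mp:
--                 mp[x] = n
--                 n += 1
--         rel.append(tuple(mp[x] for x in u))
--     return rel
-- ===== SOURCE B (Python) =====
-- def relabel(pre):
--     '''
--     Relabel the vertices of a pregraph, so that vertices of the
--     returned graph are labelled 0, 1, 2, ...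
--     '''
--     # Stateless closed form: a vertex's label is the number of distinct
--     # vertices that appear strictly before its first occurrence in the
--     # flattened edge list (first-appearance order gives 0, 1, 2, ...).
--     flat = [x for u in pre for x in u]
--     return [tuple(len(set(flat[:flat.index(x)])) for x in u) for u in pre]
-- ===== Notes on version B (the rewrite author's own statement) =====
-- stated objective: alternative
-- what changed: A numbers vertices with a stateful incremental dict-plus-counter pass that emits rows as it goes; B is stateless: it flattens the edges once and computes each label by the closed form len(set(flat[:flat.index(x)])) - the number of distinct vertices before x's first occurrence - with no mapping or counter maintained at all.
import Mathlib
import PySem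

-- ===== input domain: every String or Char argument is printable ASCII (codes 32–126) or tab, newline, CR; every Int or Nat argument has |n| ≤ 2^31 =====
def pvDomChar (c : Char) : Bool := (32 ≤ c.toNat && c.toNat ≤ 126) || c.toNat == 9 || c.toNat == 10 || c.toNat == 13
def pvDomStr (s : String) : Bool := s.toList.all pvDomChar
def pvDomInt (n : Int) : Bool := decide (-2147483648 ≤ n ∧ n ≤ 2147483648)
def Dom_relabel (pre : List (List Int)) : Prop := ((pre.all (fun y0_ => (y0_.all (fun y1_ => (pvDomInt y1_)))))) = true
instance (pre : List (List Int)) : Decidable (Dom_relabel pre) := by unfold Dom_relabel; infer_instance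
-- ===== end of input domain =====

-- B replaces A's stateful incremental numbering (dict + counter built while emitting rows) by a
-- stateless closed form: each vertex's label is the number of distinct vertices before its first
-- occurrence in the flattened edge list; same results, different algorithm (B is quadratic).


-- ===== PORT A =====
-- inner loop 'for x in u: if x not in mp: mp[x] = n; n += 1' over the state (mp, n)
def relInnerA (st : PySem.Dict Int Int × Int) (u : List Int) : PySem.Dict Int Int × Int :=
  u.foldl (fun s x => if s.1.contains x then s else (s.1.insert x s.2, s.2 + 1)) st

-- outer loop body: run the inner loop, then rel.append(tuple(mp[x] for x in u));
-- mp[x] never raises here (every x ∈ u was just inserted), so getD's default 0 is never used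
def relStepA (st : List (List Int) × (PySem.Dict Int Int × Int)) (u : List Int) :
    List (List Int) × (PySem.Dict Int Int × Int) :=
  let mn := relInnerA st.2 u
  (st.1 ++ [u.map (fun x => mn.1.getD x 0)], mn)

def relabel (pre : List (List Int)) : List (List Int) :=
  (pre.foldl relStepA ([], (PySem.Dict.empty, 0))).1

-- ===== PORT B =====
-- flat = [x for u in pre for x in u]
def bFlat (pre : List (List Int)) : List Int := pre.flatMap (fun u => u)

-- len(set(flat[:flat.index(x)])); flat.index(x) never raises (x always occurs in flat),
-- so the Option's default 0 is never used
def bLabel (flat : List Int) (x : Int) : Int :=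
  ((PySem.Set.ofList (PySem.List.slice flat none
      (some (((PySem.List.index? flat x).getD 0 : Nat) : Int)))).length : Int)

def relabel_alt (pre : List (List Int)) : List (List Int) :=
  let flat := bFlat pre
  pre.map (fun u => u.map (fun x => bLabel flat x))

-- ===== PRECONDITION & SPEC =====
def Spec_relabel (pre : List (List Int)) (out : List (List Int)) : Prop := out = relabel_alt pre
instance (pre : List (List Int)) (out : List (List Int)) : Decidable (Spec_relabel pre out) := by unfold Spec_relabel; infer_instance

-- ===== CLAIM (what is proved, stated in full; the proofs are below) =====
def Claim_equal_relabel : Prop := ∀ (pre : List (List Int)), Dom_relabel pre → Spec_relabel pre (relabel pre)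

-- ===== LEMMAS AND PROOFS =====

-- proof-side normal form of A's map-building step: insert a fresh key with the current size
def stepB (d : PySem.Dict Int Int) (x : Int) : PySem.Dict Int Int :=
  if d.contains x then d else d.insert x (d.size : Int)

lemma pair_fold (u : List Int) : ∀ (d : PySem.Dict Int Int),
    relInnerA (d, (d.size : Int)) u = (u.foldl stepB d, ((u.foldl stepB d).size : Int)) := by
  induction u with
  | nil => intro d; rfl
  | cons x xs ih =>
    intro d
    simp only [relInnerA, List.foldl_cons] at *
    by_cases h : d.contains x
    · simpa [stepB, h] using ih d
    · have hsz : ((d.insert x (d.size : Int)).size : Int) = (d.size : Int) + 1 := by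
        rw [PySem.Dict.size_insert]; simp [h]
      simpa [stepB, h, ← hsz] using ih (d.insert x (d.size : Int))

lemma contains_fold_mono (zs : List Int) : ∀ (d : PySem.Dict Int Int) (x : Int),
    d.contains x = true → (zs.foldl stepB d).contains x = true := by
  induction zs with
  | nil => intro d x h; simpa using h
  | cons z zs ih =>
    intro d x h
    simp only [List.foldl_cons]
    by_cases hz : d.contains z
    · rw [show stepB d z = d by simp [stepB, hz]]; exact ih d x h
    · refine ih _ x ?_
      simp [stepB, hz, PySem.Dict.contains_insert, h]

lemma contains_fold_of_mem (zs : List Int) : ∀ (d : PySem.Dict Int Int) (x : Int),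
    x ∈ zs → (zs.foldl stepB d).contains x = true := by
  induction zs with
  | nil => intro d x h; cases h
  | cons z zs ih =>
    intro d x h
    simp only [List.foldl_cons]
    rcases List.mem_cons.mp h with rfl | hx
    · refine contains_fold_mono zs _ x ?_
      by_cases hz : d.contains x
      · simp [stepB, hz]
      · simp [stepB, hz, PySem.Dict.contains_insert_self]
    · exact ih _ x hx

lemma getD_fold_stable (zs : List Int) : ∀ (d : PySem.Dict Int Int) (x : Int),
    d.contains x = true → (zs.foldl stepB d).getD x 0 = d.getD x 0 := by
  induction zs with
  | nil => intro d x _; rfl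
  | cons z zs ih =>
    intro d x h
    simp only [List.foldl_cons]
    by_cases hz : d.contains z
    · rw [show stepB d z = d by simp [stepB, hz]]; exact ih d x h
    · have hne : x ≠ z := fun he => by rw [he] at h; exact absurd h (by simp [hz])
      rw [show stepB d z = d.insert z (d.size : Int) by simp [stepB, hz]]
      rw [ih _ x (by simp [PySem.Dict.contains_insert, h])]
      exact PySem.Dict.getD_insert_of_ne _ _ _ hne

lemma outer_fold (suffix : List (List Int)) : ∀ (rel : List (List Int)) (d : PySem.Dict Int Int),
    (suffix.foldl relStepA (rel, (d, (d.size : Int)))).1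
      = rel ++ suffix.map (fun u => u.map (fun x =>
          ((suffix.flatMap (fun u => u)).foldl stepB d).getD x 0)) := by
  induction suffix with
  | nil => intro rel d; simp
  | cons u rest ih =>
    intro rel d
    simp only [List.foldl_cons, List.flatMap_cons, List.map_cons, List.foldl_append]
    rw [show relStepA (rel, (d, (d.size : Int))) u
          = (rel ++ [u.map (fun x => (u.foldl stepB d).getD x 0)],
             (u.foldl stepB d, ((u.foldl stepB d).size : Int))) by
        simp [relStepA, pair_fold u d]]
    rw [ih (rel ++ [u.map (fun x => (u.foldl stepB d).getD x 0)]) (u.foldl stepB d)]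
    rw [List.append_assoc, List.singleton_append]
    congr 2
    refine List.map_congr_left ?_
    intro x hx
    exact (getD_fold_stable _ _ x (contains_fold_of_mem u d x hx)).symm

-- full invariant of A's map-building fold from the empty dict, by reverse induction on the
-- processed prefix P: membership, size = number of distinct keys so far, and the CLOSED FORM
-- getD x 0 = |set(P[:P.index(x)])| that B computes directly
lemma fold_inv (P : List Int) :
    (∀ x : Int, (P.foldl stepB PySem.Dict.empty).contains x = decide (x ∈ P)) ∧
    ((P.foldl stepB PySem.Dict.empty).size = (PySem.Set.ofList P).length) ∧
    (∀ x ∈ P, ∃ k : Nat, PySem.List.index? P x = some k ∧ k ≤ P.length ∧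
        (P.foldl stepB PySem.Dict.empty).getD x 0 = ((PySem.Set.ofList (P.take k)).length : Int)) := by
  induction P using List.reverseRecOn with
  | nil =>
    refine ⟨fun x => by simp [PySem.Dict.contains_empty], by
      simp [PySem.Set.ofList, PySem.Dict.size_empty], fun x hx => absurd hx (by simp)⟩
  | append_singleton P y ih =>
    obtain ⟨hc, hs, hg⟩ := ih
    have hof : PySem.Set.ofList (P ++ [y]) = PySem.Set.add (PySem.Set.ofList P) y := by
      simp [PySem.Set.ofList_eq_foldl, List.foldl_append]
    by_cases hy : y ∈ P
    · -- y already seen: the dict is unchanged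
      have hstep : (P ++ [y]).foldl stepB PySem.Dict.empty = P.foldl stepB PySem.Dict.empty := by
        simp [List.foldl_append, stepB, hc y, hy]
      have hofeq : PySem.Set.ofList (P ++ [y]) = PySem.Set.ofList P := by
        rw [hof]; simp [PySem.Set.add, PySem.Set.mem_ofList, hy]
      refine ⟨fun x => ?_, by rw [hstep, hofeq]; exact hs, fun x hx => ?_⟩
      · rw [hstep, hc x]
        by_cases hxy : x = y
        · simp [hxy, hy]
        · simp [hxy]
      · have hxP : x ∈ P := by
          rcases List.mem_append.mp hx with h | h
          · exact h
          · simpa using (by simpa using h) ▸ hy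
        obtain ⟨k, hk, hkle, hv⟩ := hg x hxP
        refine ⟨k, ?_, by simp; omega, ?_⟩
        · rw [PySem.List.index?_append_of_mem [y] hxP]; exact hk
        · have hklt : k < P.length := by
            obtain ⟨hlt, _, _⟩ := PySem.List.getElem_of_index?_eq_some hk; exact hlt
          rw [hstep, List.take_append_of_le_length (le_of_lt hklt)]; exact hv
    · -- y is new: insert it with the current size
      have hstep : (P ++ [y]).foldl stepB PySem.Dict.empty
          = (P.foldl stepB PySem.Dict.empty).insert y ((P.foldl stepB PySem.Dict.empty).size : Int) := by
        simp [List.foldl_append, stepB, hc y, hy]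
      have hofeq : PySem.Set.ofList (P ++ [y]) = PySem.Set.ofList P ++ [y] := by
        rw [hof]
        simp [PySem.Set.add, PySem.Set.mem_ofList, hy]
      refine ⟨fun x => ?_, ?_, fun x hx => ?_⟩
      · rw [hstep, PySem.Dict.contains_insert, hc x]
        by_cases hxy : x = y
        · simp [hxy]
        · simp [hxy]
      · rw [hstep, PySem.Dict.size_insert, hc y, hofeq]
        simp [hy, hs]
      · rcases List.mem_append.mp hx with hxP | hxy
        · obtain ⟨k, hk, hkle, hv⟩ := hg x hxP
          have hne : x ≠ y := fun he => hy (he ▸ hxP)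
          refine ⟨k, ?_, by simp; omega, ?_⟩
          · rw [PySem.List.index?_append_of_mem [y] hxP]; exact hk
          · have hklt : k < P.length := by
              obtain ⟨hlt, _, _⟩ := PySem.List.getElem_of_index?_eq_some hk; exact hlt
            rw [hstep, PySem.Dict.getD_insert_of_ne _ _ _ hne,
              List.take_append_of_le_length (le_of_lt hklt)]
            exact hv
        · have hxy' : x = y := by simpa using hxy
          subst hxy'
          refine ⟨P.length, PySem.List.index?_append_singleton_self P x hy, by simp, ?_⟩
          rw [hstep, PySem.Dict.getD_insert_self, List.take_append_of_le_length le_rfl,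
            List.take_length, hs]

-- ===== VERDICT (by name: the statement is the Claim_ definition above) =====
theorem relabel_spec : Claim_equal_relabel := by
  intro pre _
  unfold Spec_relabel relabel relabel_alt
  rw [show (0 : Int) = ((PySem.Dict.empty : PySem.Dict Int Int).size : Int) by
        rw [PySem.Dict.size_empty]; rfl]
  rw [outer_fold pre [] PySem.Dict.empty]
  simp only [List.nil_append, bFlat]
  refine List.map_congr_left ?_
  intro u hu
  refine List.map_congr_left ?_
  intro x hx
  have hxF : x ∈ pre.flatMap (fun u => u) := List.mem_flatMap.mpr ⟨u, hu, hx⟩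
  obtain ⟨_, _, hg⟩ := fold_inv (pre.flatMap (fun u => u))
  obtain ⟨k, hk, hkle, hv⟩ := hg x hxF
  rw [hv]
  unfold bLabel
  rw [hk]
  simp [PySem.List.slice_to_natCast]
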